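-- pv_equiv track=rewrite | github.com/YOOOOONA/algorithm_study | [프로그래머스]네트워크.py | bfs
-- ===== SOURCE A (Python) =====
-- from collections import deque
--
-- def bfs(start,visited,computers):
--     visited[start] = 1
--     q=deque([start,])
--     while q:
--         pt = q.popleft()
--         for i in range(len(computers[pt])):
--             if computers[pt][i]==1 and visited[i]==0:
--                 visited[i] = 1
--                 q.append(i)
--     return visited
-- ===== SOURCE B (Python) =====
-- def bfs(start, visited, computers):
--     # Round-based saturation flood fill: no queue; sweep all reached rows until a fixpoint.
--     visited[start] = 1
--     n = len(visited)
--     reached = [False] * n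
--     reached[start % n] = True
--     changed = True
--     while changed:
--         changed = False
--         for u in range(n):
--             if reached[u]:
--                 row = computers[u]
--                 for i in range(len(row)):
--                     if row[i] == 1 and visited[i] == 0:
--                         visited[i] = 1
--                         reached[i] = True
--                         changed = True
--     return visited
-- ===== Notes on version B (the rewrite author's own statement) =====
-- stated objective: alternative
-- what changed: Replaces A's deque-driven BFS worklist with a queue-free round-based saturation: B repeatedly sweeps all reached rows in index order, marking newly reachable vertices, until one full sweep changes nothing. Pre_ excludes shapes where A can raise IndexError and the unspecified corner of a negative start with len(computers) != len(visited), where the two index wraparounds denote different vertices and the programs may differ.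
-- outside the precondition, e.g. on bfs(0, [0], [[0, 5]]): A returns [1], B returns [1]; on bfs(-1, [0, 0], [[0, 0], [0, 0], [1, 0]]): A returns [1, 1], B returns [0, 1]; on bfs(-1, [0], [[0], [7]]): A returns [1], B returns [1]
import Mathlib
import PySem

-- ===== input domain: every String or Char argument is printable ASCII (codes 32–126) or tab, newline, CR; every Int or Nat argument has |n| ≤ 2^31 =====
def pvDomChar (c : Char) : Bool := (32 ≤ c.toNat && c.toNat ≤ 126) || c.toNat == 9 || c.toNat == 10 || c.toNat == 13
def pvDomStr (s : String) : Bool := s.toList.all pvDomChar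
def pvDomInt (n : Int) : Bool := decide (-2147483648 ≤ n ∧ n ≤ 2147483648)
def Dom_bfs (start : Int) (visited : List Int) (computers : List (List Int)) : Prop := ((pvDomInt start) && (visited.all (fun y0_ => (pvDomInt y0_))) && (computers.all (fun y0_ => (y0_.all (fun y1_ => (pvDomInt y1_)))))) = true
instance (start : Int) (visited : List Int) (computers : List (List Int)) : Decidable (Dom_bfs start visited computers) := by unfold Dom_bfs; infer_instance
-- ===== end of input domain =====

-- B replaces A's deque-driven BFS with round-based saturation sweeps to a fixpoint (no queue);
-- equivalence is about the RETURN value only (the Python A mutates `visited` in place, as does B).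

-- ===== PORT A =====
-- inner `for i in range(len(computers[pt]))` loop: state = (visited, newly appended queue entries)
def pvScanRow (row : List Int) (v : List Int) : List Int × List Int :=
  (List.range row.length).foldl
    (fun p i =>
      if row[i]? = some 1 ∧ p.1[i]? = some 0 then (p.1.set i 1, p.2 ++ [(i : Int)]) else p)
    (v, [])

-- each write turns one zero of `visited` into a one
theorem pvCountZeroSetOne (l : List Int) (i : Nat) (h : l[i]? = some 0) :
    (l.set i 1).count 0 + 1 = l.count 0 := by
  obtain ⟨hl, he⟩ := List.getElem?_eq_some_iff.mp h
  have hpos : 0 < l.count 0 := List.count_pos_iff.mpr (by rw [← he]; exact l.getElem_mem hl)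
  rw [List.count_set hl]
  simp [he]
  omega

-- termination helper for the while-loop: each appended index consumed one zero of `visited`
theorem pvScanRow_count (row v : List Int) :
    (pvScanRow row v).1.count 0 + (pvScanRow row v).2.length = v.count 0 := by
  have aux : ∀ (l : List Nat) (p : List Int × List Int),
      ((l.foldl (fun p (i : Nat) =>
          if row[i]? = some 1 ∧ p.1[i]? = some 0 then (p.1.set i 1, p.2 ++ [(i : Int)]) else p)
        p).1.count 0 +
        (l.foldl (fun p (i : Nat) =>
          if row[i]? = some 1 ∧ p.1[i]? = some 0 then (p.1.set i 1, p.2 ++ [(i : Int)]) else p)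
        p).2.length) = p.1.count 0 + p.2.length := by
    intro l
    induction l with
    | nil => intro p; simp
    | cons i t ih =>
      intro p
      simp only [List.foldl_cons]
      split_ifs with hc
      · have h1 := pvCountZeroSetOne p.1 i hc.2
        have h2 := ih (p.1.set i 1, p.2 ++ [(i : Int)])
        simp only [List.length_append, List.length_cons, List.length_nil] at h2 ⊢
        omega
      · exact ih p
  simpa [pvScanRow] using aux (List.range row.length) (v, [])

-- `while q:` loop of A; popleft = head, append = ++ at the right
def bfsLoop (C : List (List Int)) (v : List Int) (q : List Int) : List Int :=
  match q with
  | [] => v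
  | pt :: rest =>
    let p := pvScanRow ((PySem.List.pyGet? C pt).getD []) v
    bfsLoop C p.1 (rest ++ p.2)
termination_by (v.count 0, q.length)
decreasing_by
  have h := pvScanRow_count ((PySem.List.pyGet? C pt).getD []) v
  rcases Nat.eq_zero_or_pos (pvScanRow ((PySem.List.pyGet? C pt).getD []) v).2.length with h0 | h0
  · exact Prod.Lex.right' _ (by omega) (by simp only [List.length_append, List.length_cons]; omega)
  · exact Prod.Lex.left _ _ (by omega)

-- `computers[pt]` raises outside Pre_; `.getD []` is ONLY reached on excluded inputs
def bfs (start : Int) (visited : List Int) (computers : List (List Int)) : List Int :=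
  bfsLoop computers (PySem.List.pySetD visited start 1) [start]

-- ===== PORT B =====
-- inner `for i in range(len(row))` sweep: state = (visited, reached flags, changed flag)
def pvSweepRow (row : List Int) (st : List Int × List Bool × Bool) : List Int × List Bool × Bool :=
  (List.range row.length).foldl
    (fun st i =>
      if row[i]? = some 1 ∧ st.1[i]? = some 0 then (st.1.set i 1, st.2.1.set i true, true) else st)
    st

-- one `for u in range(n)` round
def pvSweep (C : List (List Int)) (n : Nat) (st : List Int × List Bool × Bool) :
    List Int × List Bool × Bool :=
  (List.range n).foldl
    (fun st (u : Nat) =>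
      if st.2.1[u]? = some true then pvSweepRow ((PySem.List.pyGet? C (u : Int)).getD []) st else st)
    st

-- termination helper: a round that reports `changed` has turned at least one zero into a one
theorem pvSweepRow_count (c0 : Nat) (row : List Int) (st : List Int × List Bool × Bool)
    (h : st.1.count 0 ≤ c0 ∧ (st.2.2 = true → st.1.count 0 < c0)) :
    (pvSweepRow row st).1.count 0 ≤ c0 ∧
      ((pvSweepRow row st).2.2 = true → (pvSweepRow row st).1.count 0 < c0) := by
  unfold pvSweepRow
  refine List.foldlRecOn (motive := fun (st : List Int × List Bool × Bool) => st.1.count 0 ≤ c0 ∧ (st.2.2 = true → st.1.count 0 < c0)) _ _ h ?_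
  intro st hst i _
  split_ifs with hc
  · have := pvCountZeroSetOne st.1 i hc.2
    dsimp only
    exact ⟨by omega, fun _ => by omega⟩
  · exact hst

theorem pvSweep_count (C : List (List Int)) (n : Nat) (v : List Int) (r : List Bool) :
    (pvSweep C n (v, r, false)).1.count 0 ≤ v.count 0 ∧
      ((pvSweep C n (v, r, false)).2.2 = true → (pvSweep C n (v, r, false)).1.count 0 < v.count 0) := by
  unfold pvSweep
  refine List.foldlRecOn (motive := fun (st : List Int × List Bool × Bool) => st.1.count 0 ≤ v.count 0 ∧ (st.2.2 = true → st.1.count 0 < v.count 0)) _ _ ⟨le_refl _, by simp⟩ ?_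
  intro st hst u _
  split_ifs with hc
  · exact pvSweepRow_count _ _ _ hst
  · exact hst

-- `while changed:` loop of B
def pvSatLoop (C : List (List Int)) (n : Nat) (v : List Int) (r : List Bool) : List Int :=
  let st := pvSweep C n (v, r, false)
  if h : st.2.2 = true then pvSatLoop C n st.1 st.2.1 else st.1
termination_by v.count 0
decreasing_by
  have h2 := (pvSweep_count C n v r).2 h
  omega

-- `start % n` raises for n = 0 (outside Pre_); PySem.Int.mod is Python's %
def bfs_alt (start : Int) (visited : List Int) (computers : List (List Int)) : List Int :=
  let v0 := PySem.List.pySetD visited start 1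
  let n := visited.length
  let s : Nat := (PySem.Int.mod start (n : Int)).toNat
  pvSatLoop computers n v0 ((List.replicate n false).set s true)

-- ===== PRECONDITION & SPEC =====
-- Pre_ excludes the shapes on which the Python A can raise IndexError (start outside the index
-- range of visited or computers, rows longer than visited or than computers, on which a reached
-- 1-entry raises), and the unspecified corner "negative start with len(computers) ≠ len(visited)",
-- where visited[start] and computers[start] wrap to DIFFERENT vertices, no behaviour is the
-- intended one, and A and B may differ (A may still return on excluded shapes — see "cites").
def Pre_bfs (start : Int) (visited : List Int) (computers : List (List Int)) : Prop :=
  (∀ row ∈ computers, row.length ≤ visited.length ∧ row.length ≤ computers.length) ∧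
  ((0 ≤ start ∧ start < (visited.length : Int) ∧ start < (computers.length : Int)) ∨
    (start < 0 ∧ -(visited.length : Int) ≤ start ∧ computers.length = visited.length))
instance (start : Int) (visited : List Int) (computers : List (List Int)) : Decidable (Pre_bfs start visited computers) := by unfold Pre_bfs; infer_instance

def pvWitness_bfs : Int × List Int × List (List Int) := (0, [0, 0, 5], [[0, 1, 0], [0, 0, 0], [1, 0, 0]])

def Spec_bfs (start : Int) (visited : List Int) (computers : List (List Int)) (out : List Int) : Prop := out = bfs_alt start visited computers
instance (start : Int) (visited : List Int) (computers : List (List Int)) (out : List Int) : Decidable (Spec_bfs start visited computers out) := by unfold Spec_bfs; infer_instance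

-- ===== CLAIM (what is proved, stated in full; the proofs are below) =====
def Claim_equal_bfs : Prop := ∀ (start : Int) (visited : List Int) (computers : List (List Int)), Dom_bfs start visited computers → Pre_bfs start visited computers → Spec_bfs start visited computers (bfs start visited computers)

-- ===== LEMMAS AND PROOFS =====

-- the one-step relation both programs explore: an edge of value 1 into a still-unvisited vertex
def pvEdge (C : List (List Int)) (v : List Int) (a b : Nat) : Prop :=
  ((PySem.List.pyGet? C (a : Int)).getD [])[b]? = some 1 ∧ v[b]? = some 0

def pvReach (C : List (List Int)) (v0 : List Int) (s j : Nat) : Prop :=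
  Relation.ReflTransGen (pvEdge C v0) s j

-- what both final states satisfy: same length, only 1s written, writes only at reachable
-- vertices, and no enabled edge out of any written vertex (or out of the start)
def pvGood (C : List (List Int)) (v0 : List Int) (s : Nat) (w : List Int) : Prop :=
  w.length = v0.length ∧
  (∀ j : Nat, w[j]? = v0[j]? ∨ w[j]? = some 1) ∧
  (∀ j : Nat, w[j]? ≠ v0[j]? → pvReach C v0 s j) ∧
  (∀ u : Nat, (w[u]? ≠ v0[u]? ∨ u = s) → ∀ b, ¬ pvEdge C w u b)

-- `pvWrite1 v F` = v with 1 written at every index of F (the cumulative effect of both loops)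
def pvWrite1 (v : List Int) (F : List Nat) : List Int := F.foldl (fun v i => v.set i 1) v

theorem pvWrite1_cons (v : List Int) (i : Nat) (F : List Nat) :
    pvWrite1 v (i :: F) = pvWrite1 (v.set i 1) F := rfl

theorem pvWrite1_length (v : List Int) (F : List Nat) : (pvWrite1 v F).length = v.length := by
  induction F generalizing v with
  | nil => rfl
  | cons i F ih => rw [pvWrite1_cons, ih, List.length_set]

theorem pvWrite1_eq_or_one (v : List Int) (F : List Nat) (j : Nat) :
    (pvWrite1 v F)[j]? = v[j]? ∨ (pvWrite1 v F)[j]? = some 1 := by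
  induction F generalizing v with
  | nil => exact Or.inl rfl
  | cons i F ih =>
    rw [pvWrite1_cons]
    rcases ih (v.set i 1) with h | h
    · rw [h, List.getElem?_set]
      split_ifs with hij hlt
      · exact Or.inr rfl
      · subst hij; exact Or.inl (by rw [List.getElem?_eq_none (by omega)])
      · exact Or.inl rfl
    · exact Or.inr h

theorem pvWrite1_pres_one (v : List Int) (F : List Nat) (j : Nat) (h : v[j]? = some 1) :
    (pvWrite1 v F)[j]? = some 1 := by
  rcases pvWrite1_eq_or_one v F j with h' | h' <;> rw [h'] <;> try rw [h]

theorem pvWrite1_not_mem (v : List Int) (F : List Nat) (j : Nat) (h : j ∉ F) :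
    (pvWrite1 v F)[j]? = v[j]? := by
  induction F generalizing v with
  | nil => rfl
  | cons i F ih =>
    rw [pvWrite1_cons, ih _ (fun hm => h (List.mem_cons_of_mem _ hm)),
      List.getElem?_set_ne (fun he => h (by rw [← he]; exact List.mem_cons_self))]

theorem pvWrite1_mem (v : List Int) (F : List Nat) (j : Nat) (h : j ∈ F) (hlen : j < v.length) :
    (pvWrite1 v F)[j]? = some 1 := by
  induction F generalizing v with
  | nil => simp at h
  | cons i F ih =>
    rw [pvWrite1_cons]
    rcases List.mem_cons.mp h with he | hm
    · subst he
      exact pvWrite1_pres_one _ _ _ (List.getElem?_set_self hlen)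
    · exact ih (v.set i 1) hm (by rw [List.length_set]; exact hlen)

-- the indices a row scan writes, relative to the visited list at the start of the scan
def pvF (row v : List Int) : List Nat :=
  (List.range row.length).filter (fun i => decide (row[i]? = some 1 ∧ v[i]? = some 0))

theorem pvF_mem (row v : List Int) (i : Nat) :
    i ∈ pvF row v ↔ (row[i]? = some 1 ∧ v[i]? = some 0) := by
  constructor
  · intro h
    have := (List.mem_filter.mp h).2
    simpa using this
  · intro h
    refine List.mem_filter.mpr ⟨List.mem_range.mpr ?_, by simpa using h⟩
    have := List.getElem?_eq_some_iff.mp h.1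
    exact this.1

theorem pvScanRow_spec (row v : List Int) :
    pvScanRow row v = (pvWrite1 v (pvF row v), (pvF row v).map (fun i : Nat => (i : Int))) := by
  have aux : ∀ (l : List Nat), l.Nodup → ∀ (v : List Int) (acc : List Int),
      l.foldl (fun p (i : Nat) =>
          if row[i]? = some 1 ∧ p.1[i]? = some 0 then (p.1.set i 1, p.2 ++ [(i : Int)]) else p)
        (v, acc)
      = (pvWrite1 v (l.filter (fun i => decide (row[i]? = some 1 ∧ v[i]? = some 0))),
         acc ++ (l.filter (fun i => decide (row[i]? = some 1 ∧ v[i]? = some 0))).map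
            (fun i : Nat => (i : Int))) := by
    intro l
    induction l with
    | nil => intro _ v acc; simp [pvWrite1]
    | cons i t ih =>
      intro hnd v acc
      have hnotmem : i ∉ t := (List.nodup_cons.mp hnd).1
      have hndt : t.Nodup := (List.nodup_cons.mp hnd).2
      simp only [List.foldl_cons]
      split_ifs with hc
      · rw [ih hndt (v.set i 1) (acc ++ [(i : Int)])]
        have hfe : t.filter (fun x => decide (row[x]? = some 1 ∧ (v.set i 1)[x]? = some 0))
            = t.filter (fun x => decide (row[x]? = some 1 ∧ v[x]? = some 0)) := by
          refine List.filter_congr ?_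
          intro x hx
          rw [List.getElem?_set_ne (fun he => hnotmem (by rw [he]; exact hx))]
        rw [hfe, List.filter_cons_of_pos (by simpa using hc), pvWrite1_cons]
        simp
      · rw [ih hndt v acc, List.filter_cons_of_neg (by simpa using hc)]
  have := aux (List.range row.length) (List.nodup_range) v []
  simpa [pvScanRow, pvF] using this

theorem pvGood_reach (C : List (List Int)) (v0 : List Int) (s : Nat) (w : List Int)
    (h : pvGood C v0 s w) (hs : v0[s]? = some 1) :
    ∀ j, pvReach C v0 s j → w[j]? = some 1 ∧ (w[j]? ≠ v0[j]? ∨ j = s) := by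
  intro j hj
  induction hj with
  | refl =>
    refine ⟨?_, Or.inr rfl⟩
    rcases h.2.1 s with h' | h' <;> rw [h'] <;> try rw [hs]
  | @tail b c hab hbc ih =>
    have hclosed := h.2.2.2 b ih.2 c
    have hv0c : v0[c]? = some 0 := hbc.2
    have hwc : w[c]? ≠ some 0 := fun he => hclosed ⟨hbc.1, he⟩
    rcases h.2.1 c with h' | h'
    · exact absurd (h'.trans hv0c) hwc
    · exact ⟨h', Or.inl (by rw [h', hv0c]; simp)⟩

theorem pvGood_unique (C : List (List Int)) (v0 : List Int) (s : Nat) (w1 w2 : List Int)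
    (hs : v0[s]? = some 1) (h1 : pvGood C v0 s w1) (h2 : pvGood C v0 s w2) : w1 = w2 := by
  refine List.ext_getElem? fun j => ?_
  by_cases hr : pvReach C v0 s j
  · rw [(pvGood_reach C v0 s w1 h1 hs j hr).1, (pvGood_reach C v0 s w2 h2 hs j hr).1]
  · have e1 : w1[j]? = v0[j]? := by
      by_contra he; exact hr (h1.2.2.1 j he)
    have e2 : w2[j]? = v0[j]? := by
      by_contra he; exact hr (h2.2.2.1 j he)
    rw [e1, e2]

-- loop invariant of A's queue loop
def pvInvA (C : List (List Int)) (v0 : List Int) (s : Nat) (v : List Int) (q : List Int) : Prop :=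
  v.length = v0.length ∧
  (∀ j : Nat, v[j]? = v0[j]? ∨ v[j]? = some 1) ∧
  (∀ j : Nat, v[j]? ≠ v0[j]? → pvReach C v0 s j) ∧
  (∀ pt ∈ q, ∃ u : Nat, pt = (u : Int) ∧ v[u]? = some 1 ∧ pvReach C v0 s u) ∧
  (∀ u : Nat, (v[u]? ≠ v0[u]? ∨ u = s) → ((u : Int) ∈ q ∨ ∀ b, ¬ pvEdge C v u b))

theorem bfsLoop_good (C : List (List Int)) (v0 : List Int) (s : Nat) :
    ∀ (v : List Int) (q : List Int), pvInvA C v0 s v q → pvGood C v0 s (bfsLoop C v q) := by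
  intro v q
  induction v, q using bfsLoop.induct C with
  | case1 v =>
    intro hinv
    rw [bfsLoop]
    obtain ⟨hlen, hmono, hsound, _, hclosed⟩ := hinv
    refine ⟨hlen, hmono, hsound, fun u hu b => ?_⟩
    rcases hclosed u hu with hmem | hcl
    · simp at hmem
    · exact hcl b
  | case2 v pt rest p ih =>
    intro hinv
    obtain ⟨hlen, hmono, hsound, hqmark, hclosed⟩ := hinv
    obtain ⟨u, hpt, hvu, hru⟩ := hqmark pt List.mem_cons_self
    subst hpt
    rw [bfsLoop]
    apply ih
    show pvInvA C v0 s (pvScanRow ((PySem.List.pyGet? C ((u : Nat) : Int)).getD []) v).1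
      (rest ++ (pvScanRow ((PySem.List.pyGet? C ((u : Nat) : Int)).getD []) v).2)
    rw [pvScanRow_spec]
    set row := (PySem.List.pyGet? C (u : Int)).getD [] with hrow
    set F := pvF row v with hFdef
    have hF : ∀ i : Nat, i ∈ F ↔ (row[i]? = some 1 ∧ v[i]? = some 0) := fun i => pvF_mem row v i
    have hFlt : ∀ i ∈ F, i < v.length := by
      intro i hi
      exact (List.getElem?_eq_some_iff.mp ((hF i).mp hi).2).1
    have hFv0 : ∀ i ∈ F, v0[i]? = some 0 := by
      intro i hi
      rcases hmono i with h' | h'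
      · rw [← h']; exact ((hF i).mp hi).2
      · rw [((hF i).mp hi).2] at h'; simp at h'
    have hFreach : ∀ i ∈ F, pvReach C v0 s i := by
      intro i hi
      exact hru.tail ⟨((hF i).mp hi).1, hFv0 i hi⟩
    refine ⟨?_, ?_, ?_, ?_, ?_⟩
    · rw [pvWrite1_length]; exact hlen
    · intro j
      rcases pvWrite1_eq_or_one v F j with h' | h'
      · rw [h']; exact hmono j
      · exact Or.inr h'
    · intro j hj
      by_cases hm : j ∈ F
      · exact hFreach j hm
      · rw [pvWrite1_not_mem v F j hm] at hj
        exact hsound j hj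
    · intro pt' hpt'
      rcases List.mem_append.mp hpt' with hm | hm
      · obtain ⟨u', he, hvu', hr'⟩ := hqmark pt' (List.mem_cons_of_mem _ hm)
        exact ⟨u', he, pvWrite1_pres_one v F u' hvu', hr'⟩
      · obtain ⟨i, hi, he⟩ := List.exists_of_mem_map hm
        exact ⟨i, he.symm, pvWrite1_mem v F i hi (hFlt i hi), hFreach i hi⟩
    · intro u' hu'
      by_cases hm : u' ∈ F
      · exact Or.inl (List.mem_append_right _ (List.mem_map.mpr ⟨u', hm, rfl⟩))
      · rw [pvWrite1_not_mem v F u' hm] at hu'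
        rcases hclosed u' hu' with hmem | hcl
        · rcases List.mem_cons.mp hmem with he | hmem'
          · have heu : u' = u := by exact_mod_cast he
            subst heu
            refine Or.inr fun b hb => ?_
            obtain ⟨hb1, hb2⟩ := hb
            by_cases hbF : b ∈ F
            · rw [pvWrite1_mem v F b hbF (hFlt b hbF)] at hb2; simp at hb2
            · rw [pvWrite1_not_mem v F b hbF] at hb2
              exact hbF ((hF b).mpr ⟨hb1, hb2⟩)
          · exact Or.inl (List.mem_append_left _ hmem')
        · refine Or.inr fun b hb => ?_
          obtain ⟨hb1, hb2⟩ := hb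
          have hvb : v[b]? = some 0 := by
            rcases pvWrite1_eq_or_one v F b with h' | h'
            · rw [← h']; exact hb2
            · rw [h'] at hb2; simp at hb2
          exact hcl b ⟨hb1, hvb⟩

-- loop invariant of B's saturation rounds
def pvInvB (C : List (List Int)) (v0 : List Int) (s : Nat) (n : Nat)
    (v : List Int) (r : List Bool) : Prop :=
  v.length = v0.length ∧ r.length = n ∧ v0.length = n ∧
  (∀ j : Nat, v[j]? = v0[j]? ∨ v[j]? = some 1) ∧
  (∀ j : Nat, v[j]? ≠ v0[j]? → pvReach C v0 s j) ∧
  (∀ u : Nat, r[u]? = some true → v[u]? = some 1 ∧ pvReach C v0 s u) ∧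
  (∀ j : Nat, v[j]? ≠ v0[j]? → r[j]? = some true) ∧
  r[s]? = some true

theorem pvSweepRow_inv (C : List (List Int)) (v0 : List Int) (s n : Nat) (u : Nat)
    (row : List Int) (hrow : row = (PySem.List.pyGet? C (u : Int)).getD [])
    (st : List Int × List Bool × Bool)
    (h : (pvInvB C v0 s n st.1 st.2.1) ∧ st.2.1[u]? = some true) :
    (pvInvB C v0 s n (pvSweepRow row st).1 (pvSweepRow row st).2.1) ∧
      (pvSweepRow row st).2.1[u]? = some true := by
  unfold pvSweepRow
  refine List.foldlRecOn
    (motive := fun (st : List Int × List Bool × Bool) =>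
      (pvInvB C v0 s n st.1 st.2.1) ∧ st.2.1[u]? = some true) _ _ h ?_
  intro st hst i _
  split_ifs with hc
  · obtain ⟨⟨h1, h2, h3, h4, h5, h6, h7, h8⟩, hu⟩ := hst
    obtain ⟨hci, hvi⟩ := hc
    have hilt : i < st.1.length := (List.getElem?_eq_some_iff.mp hvi).1
    have hrlt : i < st.2.1.length := by omega
    have hv0i : v0[i]? = some 0 := by
      rcases h4 i with h' | h'
      · rw [← h']; exact hvi
      · rw [h'] at hvi; simp at hvi
    have hreachi : pvReach C v0 s i :=
      (h6 u hu).2.tail ⟨by rw [← hrow]; exact hci, hv0i⟩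
    dsimp only
    refine ⟨⟨by rw [List.length_set]; exact h1, by rw [List.length_set]; exact h2, h3,
      ?_, ?_, ?_, ?_, ?_⟩, ?_⟩
    · intro j
      rw [List.getElem?_set]
      by_cases hij : i = j
      · subst hij; rw [if_pos rfl, if_pos hilt]; exact Or.inr rfl
      · rw [if_neg hij]; exact h4 j
    · intro j hj
      by_cases hij : i = j
      · subst hij; exact hreachi
      · rw [List.getElem?_set_ne hij] at hj
        exact h5 j hj
    · intro u' hu'
      rw [List.getElem?_set] at hu'
      by_cases hij : i = u'
      · subst hij
        exact ⟨List.getElem?_set_self hilt, hreachi⟩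
      · rw [if_neg hij] at hu'
        obtain ⟨hv', hr'⟩ := h6 u' hu'
        exact ⟨by rw [List.getElem?_set_ne hij]; exact hv', hr'⟩
    · intro j hj
      by_cases hij : i = j
      · subst hij
        rw [List.getElem?_set, if_pos rfl, if_pos hrlt]
      · rw [List.getElem?_set_ne hij] at hj
        rw [List.getElem?_set_ne hij]
        exact h7 j hj
    · rw [List.getElem?_set]
      by_cases hij : i = s
      · subst hij; rw [if_pos rfl, if_pos hrlt]
      · rw [if_neg hij]; exact h8
    · rw [List.getElem?_set]
      by_cases hij : i = u
      · subst hij; rw [if_pos rfl, if_pos hrlt]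
      · rw [if_neg hij]; exact hu
  · exact hst

theorem pvSweep_inv (C : List (List Int)) (v0 : List Int) (s n : Nat)
    (st : List Int × List Bool × Bool) (h : pvInvB C v0 s n st.1 st.2.1) :
    pvInvB C v0 s n (pvSweep C n st).1 (pvSweep C n st).2.1 := by
  unfold pvSweep
  refine List.foldlRecOn
    (motive := fun (st : List Int × List Bool × Bool) => pvInvB C v0 s n st.1 st.2.1) _ _ h ?_
  intro st hst u _
  split_ifs with hc
  · exact (pvSweepRow_inv C v0 s n u _ rfl st ⟨hst, hc⟩).1
  · exact hst

theorem pvSweepRow_flagmono (row : List Int) (st : List Int × List Bool × Bool)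
    (h : st.2.2 = true) : (pvSweepRow row st).2.2 = true := by
  unfold pvSweepRow
  refine List.foldlRecOn (motive := fun (st : List Int × List Bool × Bool) => st.2.2 = true) _ _ h ?_
  intro st hst i _
  split_ifs with hc
  · rfl
  · exact hst

theorem pvSweepRow_false (row : List Int) (st : List Int × List Bool × Bool)
    (h : (pvSweepRow row st).2.2 = false) :
    pvSweepRow row st = st ∧ ∀ i : Nat, ¬(row[i]? = some 1 ∧ st.1[i]? = some 0) := by
  have aux : ∀ (l : List Nat) (st : List Int × List Bool × Bool),
      ((l.foldl (fun st (i : Nat) =>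
          if row[i]? = some 1 ∧ st.1[i]? = some 0 then (st.1.set i 1, st.2.1.set i true, true)
          else st) st).2.2 = false) →
      (l.foldl (fun st (i : Nat) =>
          if row[i]? = some 1 ∧ st.1[i]? = some 0 then (st.1.set i 1, st.2.1.set i true, true)
          else st) st) = st ∧ ∀ i ∈ l, ¬(row[i]? = some 1 ∧ st.1[i]? = some 0) := by
    intro l
    induction l with
    | nil => intro st _; exact ⟨rfl, by simp⟩
    | cons i t ih =>
      intro st hf
      simp only [List.foldl_cons] at hf ⊢
      split_ifs at hf ⊢ with hc
      · exfalso
        have : ((t.foldl (fun st (i : Nat) =>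
            if row[i]? = some 1 ∧ st.1[i]? = some 0 then (st.1.set i 1, st.2.1.set i true, true)
            else st) (st.1.set i 1, st.2.1.set i true, true)).2.2 = true) := by
          refine List.foldlRecOn (motive := fun (st : List Int × List Bool × Bool) => st.2.2 = true) _ _ rfl ?_
          intro st hst i' _
          split_ifs with hc'
          · rfl
          · exact hst
        rw [this] at hf; cases hf
      · obtain ⟨he, hall⟩ := ih st hf
        refine ⟨he, fun i' hi' => ?_⟩
        rcases List.mem_cons.mp hi' with h' | h'
        · subst h'; exact hc
        · exact hall i' h'
  obtain ⟨he, hall⟩ := aux (List.range row.length) st h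
  refine ⟨he, fun i => ?_⟩
  by_cases hlt : i < row.length
  · exact hall i (List.mem_range.mpr hlt)
  · intro hcc
    rw [List.getElem?_eq_none (by omega)] at hcc
    cases hcc.1

theorem pvSweep_false (C : List (List Int)) (n : Nat) (v : List Int) (r : List Bool)
    (h : (pvSweep C n (v, r, false)).2.2 = false) :
    pvSweep C n (v, r, false) = (v, r, false) ∧
      ∀ u ∈ List.range n, r[u]? = some true →
        ∀ b : Nat, ¬(((PySem.List.pyGet? C (u : Int)).getD [])[b]? = some 1 ∧ v[b]? = some 0) := by
  have aux : ∀ (l : List Nat) (st : List Int × List Bool × Bool),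
      ((l.foldl (fun st (u : Nat) =>
          if st.2.1[u]? = some true then pvSweepRow ((PySem.List.pyGet? C (u : Int)).getD []) st
          else st) st).2.2 = false) →
      (l.foldl (fun st (u : Nat) =>
          if st.2.1[u]? = some true then pvSweepRow ((PySem.List.pyGet? C (u : Int)).getD []) st
          else st) st) = st ∧
        ∀ u ∈ l, st.2.1[u]? = some true →
          ∀ b : Nat, ¬(((PySem.List.pyGet? C (u : Int)).getD [])[b]? = some 1 ∧ st.1[b]? = some 0) := by
    intro l
    induction l with
    | nil => intro st _; exact ⟨rfl, by simp⟩
    | cons u t ih =>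
      intro st hf
      simp only [List.foldl_cons] at hf ⊢
      split_ifs at hf ⊢ with hc
      · have hrowf : (pvSweepRow ((PySem.List.pyGet? C (u : Int)).getD []) st).2.2 = false := by
          by_contra hne
          have htrue : (pvSweepRow ((PySem.List.pyGet? C (u : Int)).getD []) st).2.2 = true := by
            cases hx : (pvSweepRow ((PySem.List.pyGet? C (u : Int)).getD []) st).2.2
            · exact absurd hx hne
            · rfl
          have : ((t.foldl (fun st (u : Nat) =>
              if st.2.1[u]? = some true then pvSweepRow ((PySem.List.pyGet? C (u : Int)).getD []) st
              else st) (pvSweepRow ((PySem.List.pyGet? C (u : Int)).getD []) st)).2.2 = true) := by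
            refine List.foldlRecOn (motive := fun (st : List Int × List Bool × Bool) => st.2.2 = true) _ _ htrue ?_
            intro st hst u' _
            split_ifs with hc'
            · exact pvSweepRow_flagmono _ _ hst
            · exact hst
          rw [this] at hf; cases hf
        obtain ⟨heq, hnone⟩ := pvSweepRow_false _ _ hrowf
        rw [heq] at hf ⊢
        obtain ⟨he, hall⟩ := ih st hf
        refine ⟨he, fun u' hu' hflag b => ?_⟩
        rcases List.mem_cons.mp hu' with h' | h'
        · subst h'; exact hnone b
        · exact hall u' h' hflag b
      · obtain ⟨he, hall⟩ := ih st hf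
        refine ⟨he, fun u' hu' hflag b => ?_⟩
        rcases List.mem_cons.mp hu' with h' | h'
        · subst h'; exact absurd hflag hc
        · exact hall u' h' hflag b
  simpa [pvSweep] using aux (List.range n) (v, r, false) (by simpa [pvSweep] using h)

theorem pvSatLoop_good (C : List (List Int)) (v0 : List Int) (s n : Nat) :
    ∀ (v : List Int) (r : List Bool), pvInvB C v0 s n v r →
      pvGood C v0 s (pvSatLoop C n v r) := by
  intro v r
  induction v, r using pvSatLoop.induct C n with
  | case1 v r st hflag ih =>
    intro hinv
    rw [pvSatLoop, dif_pos hflag]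
    exact ih (pvSweep_inv C v0 s n (v, r, false) hinv)
  | case2 v r st hflag =>
    intro hinv
    rw [pvSatLoop, dif_neg hflag]
    have hfalse : (pvSweep C n (v, r, false)).2.2 = false := by
      cases hx : (pvSweep C n (v, r, false)).2.2
      · rfl
      · exact absurd hx hflag
    obtain ⟨heq, hclose⟩ := pvSweep_false C n v r hfalse
    show pvGood C v0 s (pvSweep C n (v, r, false)).1
    rw [heq]
    obtain ⟨h1, h2, h3, h4, h5, h6, h7, h8⟩ := hinv
    refine ⟨h1, h4, h5, fun u hu b hedge => ?_⟩
    have hflagu : r[u]? = some true := by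
      rcases hu with hu | hu
      · exact h7 u hu
      · subst hu; exact h8
    have hultn : u < n := by
      have := (List.getElem?_eq_some_iff.mp hflagu).1
      omega
    exact hclose u (List.mem_range.mpr hultn) hflagu b hedge

theorem bfsLoop_row_congr (C : List (List Int)) (v : List Int) (a b : Int)
    (h : PySem.List.pyGet? C a = PySem.List.pyGet? C b) :
    bfsLoop C v [a] = bfsLoop C v [b] := by
  simp only [bfsLoop]
  rw [h]

-- the two ports agree once start is normalised to the vertex s it denotes
theorem pvMain (C : List (List Int)) (visited : List Int) (s : Nat) (start : Int)
    (hs : s < visited.length)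
    (hrow : PySem.List.pyGet? C start = PySem.List.pyGet? C ((s : Nat) : Int))
    (hv0 : PySem.List.pySetD visited start 1 = visited.set s 1)
    (hsalt : (PySem.Int.mod start (visited.length : Int)).toNat = s) :
    bfs start visited C = bfs_alt start visited C := by
  have hv0s : (visited.set s 1)[s]? = some 1 := List.getElem?_set_self hs
  show bfsLoop C (PySem.List.pySetD visited start 1) [start]
      = pvSatLoop C visited.length (PySem.List.pySetD visited start 1)
          ((List.replicate visited.length false).set
            ((PySem.Int.mod start (visited.length : Int)).toNat) true)
  rw [hv0, hsalt, bfsLoop_row_congr C _ start ((s : Nat) : Int) hrow]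
  have hgoodA : pvGood C (visited.set s 1) s (bfsLoop C (visited.set s 1) [((s : Nat) : Int)]) := by
    apply bfsLoop_good
    refine ⟨rfl, fun j => Or.inl rfl, fun j hj => absurd rfl hj, ?_, ?_⟩
    · intro pt hpt
      rw [List.mem_singleton] at hpt
      exact ⟨s, hpt, hv0s, Relation.ReflTransGen.refl⟩
    · intro u hu
      rcases hu with hu | hu
      · exact absurd rfl hu
      · subst hu; exact Or.inl (List.mem_singleton.mpr rfl)
  have hgoodB : pvGood C (visited.set s 1) s
      (pvSatLoop C visited.length (visited.set s 1)
        ((List.replicate visited.length false).set s true)) := by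
    apply pvSatLoop_good
    have hrlen : ((List.replicate visited.length false).set s true).length = visited.length := by
      simp
    have hsflag : ((List.replicate visited.length false).set s true)[s]? = some true :=
      List.getElem?_set_self (by simpa using hs)
    refine ⟨rfl, hrlen, by rw [List.length_set], fun j => Or.inl rfl, fun j hj => absurd rfl hj,
      ?_, fun j hj => absurd rfl hj, hsflag⟩
    intro u hu
    by_cases hsu : s = u
    · subst hsu; exact ⟨hv0s, Relation.ReflTransGen.refl⟩
    · rw [List.getElem?_set_ne hsu, List.getElem?_replicate] at hu
      split_ifs at hu <;> cases hu
  exact pvGood_unique C (visited.set s 1) s _ _ hv0s hgoodA hgoodB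

-- ===== VERDICT (by name: the statement is the Claim_ definition above) =====
theorem bfs_spec : Claim_equal_bfs := by
  intro start visited C _ hpre
  unfold Spec_bfs
  obtain ⟨hrows, hstart⟩ := hpre
  rcases hstart with ⟨h0, h1, hm⟩ | ⟨h0, h1, h2⟩
  · -- 0 ≤ start < len(visited)
    have hmod : PySem.Int.mod start (visited.length : Int) = start := by
      rw [PySem.Int.mod_eq_emod_of_pos (by omega)]
      exact Int.emod_eq_of_lt h0 h1
    refine pvMain C visited start.toNat start (by omega) ?_ ?_ (by rw [hmod])
    · rw [PySem.List.pyGet?_of_nonneg C h0, PySem.List.pyGet?_natCast]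
    · exact PySem.List.pySetD_of_nonneg visited 1 h0
  · -- -len(visited) ≤ start < 0 and len(computers) = len(visited)
    have hmod : PySem.Int.mod start (visited.length : Int) = start + visited.length := by
      rw [PySem.Int.mod_eq_emod_of_pos (by omega)]
      have he : start = (start + visited.length) - visited.length := by ring
      conv_lhs => rw [he, Int.sub_emod_right]
      exact Int.emod_eq_of_lt (by omega) (by omega)
    refine pvMain C visited (start + visited.length).toNat start (by omega) ?_ ?_
      (by rw [hmod])
    · have hk : start = -((((-start).toNat : Nat)) : Int) := by omega
      have h3 : PySem.List.pyGet? C start = C[C.length - (-start).toNat]? := by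
        conv_lhs => rw [hk]
        exact PySem.List.pyGet?_neg_natCast C (-start).toNat (by omega) (by omega)
      rw [h3, PySem.List.pyGet?_natCast]
      congr 1
      omega
    · have h4 : PySem.List.pySetD visited start 1
          = visited.set (visited.length - (-start).toNat) 1 := by
        simp only [PySem.List.pySetD, PySem.List.pySet?, PySem.List.pyIdx?,
          if_neg (not_le.mpr h0), if_pos h1]
        rfl
      rw [h4]
      congr 1
      omega
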